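-- pv_equiv track=rewrite | github.com/mmfiora/auto | dbassp/src/collectors/lipophilicity.py | count_ionizable_groups
-- ===== SOURCE A (Python) =====
-- ACIDIC_AA_PKA = {
--     'D': 3.9,   # Aspartate
--     'C': 8.37,  # Cysteine
--     'E': 4.07,  # Glutamate
--     'Y': 10.5,  # Tyrosine
-- }
--
-- BASIC_AA_PKA = {
--     'R': 12.48,  # Arginine (pKb=1.52)
--     'H': 6.04,   # Histidine (pKb=7.96)
--     'K': 10.54,  # Lysine (pKb=3.46)
--     'O': 10.50,  # Ornithine (pKb=3.5)
--     'B': 10.27,  # Diaminobutyric acid (pKb=3.73)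
--     'J': 9.43,   # Diaminopropionic acid (pKb=4.57)
-- }
--
-- def count_ionizable_groups(sequence: str) -> dict:
--     """
--     Count ionizable groups in peptide sequence.
--     Returns dict with counts of acidic and basic residues.
--     """
--     acidic_count = {}
--     basic_count = {}
--
--     for aa in sequence.upper():
--         if aa in ACIDIC_AA_PKA:
--             acidic_count[aa] = acidic_count.get(aa, 0) + 1
--         elif aa in BASIC_AA_PKA:
--             basic_count[aa] = basic_count.get(aa, 0) + 1
--
--     return {
--         'acidic': acidic_count,
--         'basic': basic_count
--     }
-- ===== SOURCE B (Python) =====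
-- ACIDIC_AA_PKA = {
--     'D': 3.9,   # Aspartate
--     'C': 8.37,  # Cysteine
--     'E': 4.07,  # Glutamate
--     'Y': 10.5,  # Tyrosine
-- }
--
-- BASIC_AA_PKA = {
--     'R': 12.48,  # Arginine
--     'H': 6.04,   # Histidine
--     'K': 10.54,  # Lysine
--     'O': 10.50,  # Ornithine
--     'B': 10.27,  # Diaminobutyric acid
--     'J': 9.43,   # Diaminopropionic acid
-- }
--
-- def count_ionizable_groups(sequence: str) -> dict:
--     """No running tallies: list the distinct residues of each group in
--     first-appearance order, then count each one with its own scan."""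
--     residues = list(sequence.upper())
--
--     def project(table):
--         keys = dict.fromkeys(aa for aa in residues if aa in table)
--         return {k: residues.count(k) for k in keys}
--
--     return {'acidic': project(ACIDIC_AA_PKA), 'basic': project(BASIC_AA_PKA)}
-- ===== Notes on version B (the rewrite author's own statement) =====
-- stated objective: alternative
-- what changed: Replaces A's single branched pass that maintains two running count dicts with a staged decomposition: list the distinct residues of each group in first-appearance order (dict.fromkeys) and then count each distinct residue with its own list.count scan.
import Mathlib
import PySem

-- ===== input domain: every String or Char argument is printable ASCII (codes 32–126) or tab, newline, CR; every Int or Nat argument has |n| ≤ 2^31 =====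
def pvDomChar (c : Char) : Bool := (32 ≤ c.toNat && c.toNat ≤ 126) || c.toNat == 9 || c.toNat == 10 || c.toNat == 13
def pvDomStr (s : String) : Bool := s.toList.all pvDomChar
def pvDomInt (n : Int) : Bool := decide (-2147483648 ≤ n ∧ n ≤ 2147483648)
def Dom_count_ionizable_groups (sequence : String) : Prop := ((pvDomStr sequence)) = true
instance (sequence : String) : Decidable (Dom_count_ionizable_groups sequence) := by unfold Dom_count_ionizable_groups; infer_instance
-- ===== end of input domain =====

-- B drops A's single pass with two running count dicts: it first lists the distinct residues of
-- each group in first-appearance order (dict.fromkeys) and then counts each one by its own scan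
-- (objective: alternative decomposition, similar cost).

-- ===== PORT A =====
-- the pKa dicts are only used for key membership, so only their keys are ported
def acidicKeys : List String := ["D", "C", "E", "Y"]
def basicKeys : List String := ["R", "H", "K", "O", "B", "J"]

def count_ionizable_groups (sequence : String) : List (String × List (String × Int)) :=
  let st := (PySem.Chars.upper sequence.toList).foldl
    (fun (st : PySem.Dict String Int × PySem.Dict String Int) c =>
      let aa := String.ofList [c]
      if acidicKeys.contains aa then
        (st.1.insert aa (st.1.getD aa 0 + 1), st.2)
      else if basicKeys.contains aa then
        (st.1, st.2.insert aa (st.2.getD aa 0 + 1))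
      else st)
    (PySem.Dict.empty, PySem.Dict.empty)
  [("acidic", st.1.items), ("basic", st.2.items)]

-- ===== PORT B =====
-- project(table): distinct residues of the group in first-appearance order, each with its own count-scan
def projectB (residues : List String) (table : List String) : List (String × Int) :=
  (PySem.List.dedup (residues.filter (fun aa => table.contains aa))).map
    (fun k => (k, (residues.count k : Int)))

def count_ionizable_groups_alt (sequence : String) : List (String × List (String × Int)) :=
  let residues := (PySem.Chars.upper sequence.toList).map (fun c => String.ofList [c])
  [("acidic", projectB residues acidicKeys), ("basic", projectB residues basicKeys)]

-- ===== PRECONDITION & SPEC =====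
def Spec_count_ionizable_groups (sequence : String) (out : List (String × List (String × Int))) : Prop := out = count_ionizable_groups_alt sequence
instance (sequence : String) (out : List (String × List (String × Int))) : Decidable (Spec_count_ionizable_groups sequence out) := by unfold Spec_count_ionizable_groups; infer_instance

-- ===== CLAIM (what is proved, stated in full; the proofs are below) =====
def Claim_equal_count_ionizable_groups : Prop := ∀ (sequence : String), Dom_count_ionizable_groups sequence → Spec_count_ionizable_groups sequence (count_ionizable_groups sequence)

-- ===== LEMMAS AND PROOFS =====

-- A's loop with two independent accumulators splits into two filtered counting loops
theorem split_fold (cs : List Char) (a b : PySem.Dict String Int) :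
    cs.foldl
      (fun (st : PySem.Dict String Int × PySem.Dict String Int) c =>
        let aa := String.ofList [c]
        if acidicKeys.contains aa then
          (st.1.insert aa (st.1.getD aa 0 + 1), st.2)
        else if basicKeys.contains aa then
          (st.1, st.2.insert aa (st.2.getD aa 0 + 1))
        else st)
      (a, b)
    = ((cs.filter (fun c => acidicKeys.contains (String.ofList [c]))).foldl
         (fun d c => d.insert (String.ofList [c]) (d.getD (String.ofList [c]) 0 + 1)) a,
       (cs.filter (fun c => !acidicKeys.contains (String.ofList [c]) && basicKeys.contains (String.ofList [c]))).foldl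
         (fun d c => d.insert (String.ofList [c]) (d.getD (String.ofList [c]) 0 + 1)) b) := by
  induction cs generalizing a b with
  | nil => rfl
  | cons c cs ih =>
    simp only [List.foldl_cons, List.filter_cons]
    cases ha : acidicKeys.contains (String.ofList [c]) with
    | true =>
      simp only [Bool.not_true, Bool.false_and, if_true, Bool.false_eq_true, if_false]
      exact ih _ _
    | false =>
      cases hb : basicKeys.contains (String.ofList [c]) with
      | true =>
        simp only [Bool.not_false, Bool.true_and, if_true, Bool.false_eq_true, if_false]
        exact ih _ _
      | false =>
        simp only [Bool.not_false, Bool.true_and, Bool.false_eq_true, if_false]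
        exact ih _ _

-- one group of A's result = B's project over that group's membership test
theorem group_eq (xs : List String) (P : String → Bool) :
    (PySem.Dict.counter (xs.filter P)).items
      = (PySem.List.dedup (xs.filter P)).map (fun k => (k, (xs.count k : Int))) := by
  rw [PySem.Dict.items_counter, PySem.List.dedup_eq_ofList]
  refine List.map_congr_left (fun k hk => ?_)
  have hp : P k = true := (List.mem_filter.mp ((PySem.List.mem_dedup (xs.filter P) k).mp hk)).2
  rw [List.count_filter hp]

-- A tests basic only when acidic failed; the two key sets are disjoint, so the tests coincide
theorem basic_test_eq (x : String) :
    (!acidicKeys.contains x && basicKeys.contains x) = basicKeys.contains x := by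
  by_cases hb : x ∈ basicKeys
  · have ha : x ∉ acidicKeys := by fin_cases hb <;> decide
    simp [ha, hb]
  · simp [hb]

-- filtering the tagged strings = tagging the filtered chars
theorem filter_map_single (P : String → Bool) (cs : List Char) :
    (cs.filter (fun c => P (String.ofList [c]))).map (fun c => String.ofList [c])
      = (cs.map (fun c => String.ofList [c])).filter P := by
  rw [List.filter_map]; rfl

-- ===== VERDICT (by name: the statement is the Claim_ definition above) =====
theorem count_ionizable_groups_spec : Claim_equal_count_ionizable_groups := by
  intro sequence _
  unfold Spec_count_ionizable_groups count_ionizable_groups count_ionizable_groups_alt projectB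
  simp only [split_fold]
  rw [List.filter_congr (fun x _ => basic_test_eq (String.ofList [x]))]
  rw [← List.foldl_map (f := fun c => String.ofList [c])
        (g := fun (d : PySem.Dict String Int) k => d.insert k (d.getD k 0 + 1)),
      ← List.foldl_map (f := fun c => String.ofList [c])
        (g := fun (d : PySem.Dict String Int) k => d.insert k (d.getD k 0 + 1)),
      filter_map_single, filter_map_single,
      PySem.Dict.foldl_insert_getD_add_one_eq_counter,
      PySem.Dict.foldl_insert_getD_add_one_eq_counter,
      group_eq, group_eq]
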